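-- pv_equiv track=rewrite | github.com/lewismj/zeta | zeta_lsp/server.py | _extract_callee_name
-- ===== SOURCE A (Python) =====
-- from typing import Dict, Optional, List
--
-- def _extract_callee_name(prefix: str) -> Optional[str]:
--     # find last '(' and take following token
--     lp = prefix.rfind('(')
--     if lp == -1:
--         return None
--     tail = prefix[lp + 1 :].strip()
--     if not tail:
--         return None
--     # first token
--     for sep in [' ', '\t', '\n', '\r', ')']:
--         p = tail.find(sep)
--         if p != -1:
--             tail = tail[:p]
--     # strip package qualifier does not change callee name lookup for builtins
--     return tail
-- ===== SOURCE B (Python) =====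
-- def _extract_callee_name(prefix: str):
--     lp = prefix.rfind('(')
--     if lp == -1:
--         return None
--     tail = prefix[lp + 1 :].strip()
--     if not tail:
--         return None
--     # single left-to-right scan: cut at the first delimiter character
--     for i, ch in enumerate(tail):
--         if ch in ' \t\n\r)':
--             return tail[:i]
--     return tail
-- ===== Notes on version B (the rewrite author's own statement) =====
-- stated objective: idiomatic
-- what changed: replaced the five separate find-and-truncate passes (one per separator) with a single left-to-right scan that cuts the tail at the first delimiter character
import Mathlib
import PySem

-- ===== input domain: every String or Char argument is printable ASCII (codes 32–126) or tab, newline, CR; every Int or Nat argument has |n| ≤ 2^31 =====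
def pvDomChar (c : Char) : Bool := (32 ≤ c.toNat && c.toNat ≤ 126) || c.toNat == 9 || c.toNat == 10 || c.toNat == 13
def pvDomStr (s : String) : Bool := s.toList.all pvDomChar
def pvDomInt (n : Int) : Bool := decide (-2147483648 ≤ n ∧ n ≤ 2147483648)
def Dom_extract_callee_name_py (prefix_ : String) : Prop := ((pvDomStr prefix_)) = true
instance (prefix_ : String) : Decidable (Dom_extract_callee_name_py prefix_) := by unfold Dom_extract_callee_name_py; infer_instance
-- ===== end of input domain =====

-- B replaces A's five find-and-truncate passes over the separator list by one left-to-right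
-- scan cutting at the first delimiter (idiomatic single pass); same return value everywhere.

-- ===== PORT A =====
def extract_callee_name_py (prefix_ : String) : Option String :=
  let lp := PySem.Str.rfind prefix_ "("
  if lp = -1 then none
  else
    let tail := PySem.Chars.strip (PySem.Chars.slice prefix_.toList (some (lp + 1)) none)
    if tail = [] then none
    else
      -- for sep in [' ', '\t', '\n', '\r', ')']: p = tail.find(sep); if p != -1: tail = tail[:p]
      let t := [' ', '\t', '\n', '\r', ')'].foldl
        (fun tl sep =>
          let p := PySem.Chars.find tl [sep]
          if p ≠ -1 then PySem.Chars.slice tl none (some p) else tl) tail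
      some (String.ofList t)

-- ===== PORT B =====
-- 'for i, ch in enumerate(tail): if ch in " \t\n\r)": return tail[:i]' / 'return tail'
def pvCutTok (t : List Char) : List Char :=
  match t with
  | [] => []
  | c :: rest =>
    if c = ' ' ∨ c = '\t' ∨ c = '\n' ∨ c = '\r' ∨ c = ')' then []
    else c :: pvCutTok rest

def extract_callee_name_py_alt (prefix_ : String) : Option String :=
  let lp := PySem.Str.rfind prefix_ "("
  if lp = -1 then none
  else
    let tail := PySem.Chars.strip (PySem.Chars.slice prefix_.toList (some (lp + 1)) none)
    if tail = [] then none
    else some (String.ofList (pvCutTok tail))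

-- ===== PRECONDITION & SPEC =====
def Spec_extract_callee_name_py (prefix_ : String) (out : Option String) : Prop := out = extract_callee_name_py_alt prefix_
instance (prefix_ : String) (out : Option String) : Decidable (Spec_extract_callee_name_py prefix_ out) := by unfold Spec_extract_callee_name_py; infer_instance

-- ===== CLAIM (what is proved, stated in full; the proofs are below) =====
def Claim_equal_extract_callee_name_py : Prop := ∀ (prefix_ : String), Dom_extract_callee_name_py prefix_ → Spec_extract_callee_name_py prefix_ (extract_callee_name_py prefix_)

-- ===== LEMMAS AND PROOFS =====

-- find.go with a single-char needle, at any offset k, is k + index of the first occurrence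
theorem pvGoSingle (s : Char) (t : List Char) (k : Nat) :
    PySem.Chars.find.go [s] t k =
      match t.findIdx? (fun c => c == s) with
      | some i => ((k + i : Nat) : Int)
      | none => -1 := by
  induction t generalizing k with
  | nil => simp [PySem.Chars.find.go]
  | cons c r ih =>
    by_cases h : c = s
    · subst h
      simp [PySem.Chars.find.go, List.isPrefixOf, List.findIdx?_cons]
    · have hps : [s].isPrefixOf (c :: r) = false := by
        simp [List.isPrefixOf]
        exact fun hcs => h hcs.symm
      rw [PySem.Chars.find.go]
      simp only [hps]
      rw [ih (k + 1)]
      have hcs : (c == s) = false := by simp [h]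
      rw [List.findIdx?_cons]
      simp only [hcs]
      cases hfi : r.findIdx? (fun c => c == s) with
      | none => simp
      | some i =>
        simp only [Option.map_some]
        push_cast
        ring_nf

-- A's per-separator truncation step is takeWhile (· ≠ sep)
theorem pvStepEq (t : List Char) (s : Char) :
    (let p := PySem.Chars.find t [s]
     if p ≠ -1 then PySem.Chars.slice t none (some p) else t)
      = t.takeWhile (fun c => !(c == s)) := by
  have hfind : PySem.Chars.find t [s] =
      (match t.findIdx? (fun c => c == s) with
       | some i => ((i : Nat) : Int)
       | none => -1) := by
    have := pvGoSingle s t 0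
    simpa [PySem.Chars.find] using this
  cases hfi : t.findIdx? (fun c => c == s) with
  | none =>
    simp only [hfind, hfi]
    have : ∀ c ∈ t, ¬(c == s) = true := by
      intro c hc
      have := List.findIdx?_eq_none_iff.mp hfi
      simpa using this c hc
    simp only [ne_eq, not_true_eq_false, if_false]
    · symm
      rw [List.takeWhile_eq_self_iff]
      intro c hc
      simpa using this c hc
  | some i =>
    simp only [hfind, hfi]
    have hne : ((i : Nat) : Int) ≠ -1 := by omega
    rw [if_pos hne]
    show PySem.List.slice t none (some ((i : Nat) : Int)) = _
    rw [PySem.List.slice_to t (Int.natCast_nonneg i)]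
    simp only [Int.toNat_natCast]
    -- take up to the first occurrence index = takeWhile not-equal
    clear hfind hne
    induction t generalizing i with
    | nil => simp at hfi
    | cons c r ih =>
      rw [List.findIdx?_cons] at hfi
      by_cases h : (c == s) = true
      · simp only [h, if_true] at hfi
        cases hfi
        simp [h]
      · have h' : (c == s) = false := by simpa using h
        simp only [h', Bool.false_eq_true, if_false] at hfi
        cases hfi2 : r.findIdx? (fun c => c == s) with
        | none => simp [hfi2] at hfi
        | some j =>
          simp only [hfi2, Option.map_some] at hfi
          cases hfi
          simp [h', ih j hfi2]

-- the whole separator loop is one takeWhile, which is pvCutTok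
theorem pvLoopEq (tail : List Char) :
    [' ', '\t', '\n', '\r', ')'].foldl
        (fun tl sep =>
          let p := PySem.Chars.find tl [sep]
          if p ≠ -1 then PySem.Chars.slice tl none (some p) else tl) tail
      = pvCutTok tail := by
  have h1 : [' ', '\t', '\n', '\r', ')'].foldl
        (fun tl sep =>
          let p := PySem.Chars.find tl [sep]
          if p ≠ -1 then PySem.Chars.slice tl none (some p) else tl) tail
      = ((((tail.takeWhile (fun c => !(c == ' '))).takeWhile (fun c => !(c == '\t'))).takeWhile
            (fun c => !(c == '\n'))).takeWhile (fun c => !(c == '\r'))).takeWhile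
            (fun c => !(c == ')')) := by
    simp only [List.foldl_cons, List.foldl_nil, pvStepEq]
  rw [h1]
  clear h1
  induction tail with
  | nil => simp [pvCutTok]
  | cons c r ih =>
    by_cases h : c = ' ' ∨ c = '\t' ∨ c = '\n' ∨ c = '\r' ∨ c = ')'
    · rw [pvCutTok]
      rw [if_pos h]
      rcases h with h | h | h | h | h <;> subst h <;> simp
    · push_neg at h
      obtain ⟨h1', h2', h3', h4', h5'⟩ := h
      rw [pvCutTok, if_neg (by tauto)]
      simp [h1', h2', h3', h4', h5', ih]

-- ===== VERDICT (by name: the statement is the Claim_ definition above) =====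
theorem extract_callee_name_py_spec : Claim_equal_extract_callee_name_py := by
  intro prefix_ _
  unfold Spec_extract_callee_name_py extract_callee_name_py extract_callee_name_py_alt
  simp only [pvLoopEq]
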